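-- pv_equiv track=rewrite | github.com/GiantClam/shpitto_tools | asset-factory/pipelines/map.py | _group_atoms_by_row
-- ===== SOURCE A (Python) =====
-- def _group_atoms_by_row(atoms: list[dict], row_gap: int = 28) -> list[list[dict]]:
--     rows: list[list[dict]] = []
--     for atom in atoms:
--         bbox = atom.get("bbox") if isinstance(atom, dict) else None
--         if not isinstance(bbox, dict):
--             continue
--         y = int(bbox.get("y") or 0)
--         placed = False
--         for row in rows:
--             ry = int(row[0].get("bbox", {}).get("y") or 0)
--             if abs(y - ry) <= row_gap:
--                 row.append(atom)
--                 placed = True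
--                 break
--         if not placed:
--             rows.append([atom])
--     return rows
-- ===== SOURCE B (Python) =====
-- def _bisect_left(a: list[int], x: int) -> int:
--     lo, hi = 0, len(a)
--     while lo < hi:
--         mid = (lo + hi) // 2
--         if a[mid] < x:
--             lo = mid + 1
--         else:
--             hi = mid
--     return lo
--
--
-- def _group_atoms_by_row(atoms: list[dict], row_gap: int = 28) -> list[list[dict]]:
--     # Sorted index of representative y's with binary search: for each atom,
--     # locate the window of rows whose representative y lies in
--     # [y - row_gap, y + row_gap] and join the earliest-created row in it
--     # (= the first-created matching row); otherwise open a new row and insert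
--     # its y into the sorted index.
--     keys: list[int] = []   # representative y's, kept sorted
--     idxs: list[int] = []   # creation index of the row, parallel to keys
--     rows: list[list[dict]] = []
--     for atom in atoms:
--         bbox = atom.get("bbox") if isinstance(atom, dict) else None
--         if not isinstance(bbox, dict):
--             continue
--         y = int(bbox.get("y") or 0)
--         lo = _bisect_left(keys, y - row_gap)
--         hi = _bisect_left(keys, y + row_gap + 1)
--         if lo < hi:
--             rows[min(idxs[lo:hi])].append(atom)
--         else:
--             pos = _bisect_left(keys, y)
--             keys.insert(pos, y)
--             idxs.insert(pos, len(rows))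
--             rows.append([atom])
--     return rows
-- ===== Notes on version B (the rewrite author's own statement) =====
-- stated objective: alternative
-- what changed: B replaces A's linear first-fit scan over the list of rows by a sorted index of representative y values: a hand-written binary search locates the window of rows whose representative y is within row_gap, and the atom joins the earliest-created row in that window (provably A's first-fit row), inserting a new key into the sorted index otherwise.
import Mathlib
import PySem

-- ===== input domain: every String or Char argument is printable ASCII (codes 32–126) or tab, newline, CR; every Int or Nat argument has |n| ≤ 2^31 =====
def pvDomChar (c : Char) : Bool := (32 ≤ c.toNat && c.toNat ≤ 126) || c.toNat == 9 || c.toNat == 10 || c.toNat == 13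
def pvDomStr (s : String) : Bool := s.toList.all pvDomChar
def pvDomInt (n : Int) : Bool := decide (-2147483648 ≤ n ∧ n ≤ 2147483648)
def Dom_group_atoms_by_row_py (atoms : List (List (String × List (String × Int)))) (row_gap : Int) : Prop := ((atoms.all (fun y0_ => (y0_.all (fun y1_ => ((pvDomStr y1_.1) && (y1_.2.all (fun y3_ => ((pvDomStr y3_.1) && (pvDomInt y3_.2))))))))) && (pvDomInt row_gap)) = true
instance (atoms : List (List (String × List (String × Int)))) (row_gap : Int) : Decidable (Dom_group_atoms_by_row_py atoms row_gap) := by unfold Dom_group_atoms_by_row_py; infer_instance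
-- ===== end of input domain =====

-- B replaces A's linear first-fit scan over rows by a sorted index of representative
-- y values queried with hand-written binary search (earliest-created row in the
-- matching y-window); same results, different data structure.


-- dict.get(k) on the association-list encoding (first match), shared primitive
def pvGet {V : Type} (d : List (String × V)) (k : String) : Option V :=
  (d.find? (fun p => p.1 == k)).map Prod.snd

-- ===== PORT A =====
-- ry = int(row[0].get("bbox", {}).get("y") or 0); 'or 0' is exact as getD 0 (0 is falsy → 0),
-- int() is identity on int; row is never [] in A (its [] value is irrelevant to the claim)
def pvRowY (row : List (List (String × List (String × Int)))) : Int :=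
  match row with
  | [] => 0
  | a :: _ => ((pvGet ((pvGet a "bbox").getD []) "y").getD 0)

-- the inner 'for row in rows: … break / if not placed: rows.append([atom])'
def pvPlaceA (row_gap y : Int) (atom : List (String × List (String × Int))) :
    List (List (List (String × List (String × Int)))) → List (List (List (String × List (String × Int))))
  | [] => [[atom]]
  | row :: rest =>
    if |y - pvRowY row| ≤ row_gap then (row ++ [atom]) :: rest
    else row :: pvPlaceA row_gap y atom rest

-- one iteration of A's outer loop ('isinstance(atom, dict)' always true at this type;
-- 'not isinstance(bbox, dict)' means the key "bbox" is absent)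
def pvStepA (row_gap : Int) (rows : List (List (List (String × List (String × Int)))))
    (atom : List (String × List (String × Int))) : List (List (List (String × List (String × Int)))) :=
  match pvGet atom "bbox" with
  | none => rows
  | some b => pvPlaceA row_gap ((pvGet b "y").getD 0) atom rows

def group_atoms_by_row_py (atoms : List (List (String × List (String × Int)))) (row_gap : Int) : List (List (List (String × List (String × Int)))) :=
  atoms.foldl (pvStepA row_gap) []

-- ===== PORT B =====
-- _bisect_left(a, x): the hand-written while-loop, as structural recursion on a
-- fuel of hi - lo iterations (a pure totality guard: the loop shrinks hi - lo by
-- at least 1 per step); a[mid] is in range whenever lo < hi ≤ len a, so getD is exact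
def pvBLFuel (a : List Int) (x : Int) : Nat → Nat → Nat → Nat
  | 0, lo, _ => lo
  | fuel + 1, lo, hi =>
    if lo < hi then
      let mid := (lo + hi) / 2
      if a.getD mid 0 < x then pvBLFuel a x fuel (mid + 1) hi else pvBLFuel a x fuel lo mid
    else lo

def pvBL (a : List Int) (x : Int) (lo hi : Nat) : Nat := pvBLFuel a x (hi - lo) lo hi

-- min(l) for the nonempty slice (Python's min over ints)
def pvMin (l : List Nat) : Nat :=
  match l with
  | [] => 0
  | x :: xs => xs.foldl Nat.min x

-- rows[i].append(atom): functional update of the i-th row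
def pvAppendAt (i : Nat) (atom : List (String × List (String × Int))) :
    List (List (List (String × List (String × Int)))) → List (List (List (String × List (String × Int))))
  | [] => []
  | row :: rest =>
    match i with
    | 0 => (row ++ [atom]) :: rest
    | i + 1 => row :: pvAppendAt i atom rest

-- one iteration of B's loop over the state (keys, idxs, rows);
-- idxs[lo:hi] with 0 ≤ lo ≤ hi ≤ len is exactly (drop lo).take (hi - lo),
-- keys.insert(pos, y) with 0 ≤ pos ≤ len is exactly insertIdx pos y
def pvStepB (g : Int)
    (st : List Int × List Nat × List (List (List (String × List (String × Int)))))
    (atom : List (String × List (String × Int))) :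
    List Int × List Nat × List (List (List (String × List (String × Int)))) :=
  match pvGet atom "bbox" with
  | none => st
  | some b =>
    let y := (pvGet b "y").getD 0
    match st with
    | (keys, idxs, rows) =>
      let lo := pvBL keys (y - g) 0 keys.length
      let hi := pvBL keys (y + g + 1) 0 keys.length
      if lo < hi then
        (keys, idxs, pvAppendAt (pvMin ((idxs.drop lo).take (hi - lo))) atom rows)
      else
        let pos := pvBL keys y 0 keys.length
        (keys.insertIdx pos y, idxs.insertIdx pos rows.length, rows ++ [[atom]])

def group_atoms_by_row_py_alt (atoms : List (List (String × List (String × Int)))) (row_gap : Int) : List (List (List (String × List (String × Int)))) :=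
  (atoms.foldl (pvStepB row_gap) ([], [], [])).2.2

-- ===== PRECONDITION & SPEC =====
def Spec_group_atoms_by_row_py (atoms : List (List (String × List (String × Int)))) (row_gap : Int) (out : List (List (List (String × List (String × Int))))) : Prop := out = group_atoms_by_row_py_alt atoms row_gap
instance (atoms : List (List (String × List (String × Int)))) (row_gap : Int) (out : List (List (List (String × List (String × Int))))) : Decidable (Spec_group_atoms_by_row_py atoms row_gap out) := by unfold Spec_group_atoms_by_row_py; infer_instance

-- ===== CLAIM (what is proved, stated in full; the proofs are below) =====
def Claim_equal_group_atoms_by_row_py : Prop := ∀ (atoms : List (List (String × List (String × Int)))) (row_gap : Int), Dom_group_atoms_by_row_py atoms row_gap → Spec_group_atoms_by_row_py atoms row_gap (group_atoms_by_row_py atoms row_gap)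

-- ===== LEMMAS AND PROOFS =====

-- first-fit index of A's inner scan, abstracted over the list of representative y's
def pvFindRep (g y : Int) : List Int → Option Nat
  | [] => none
  | ry :: rest =>
    if |y - ry| ≤ g then some 0
    else (pvFindRep g y rest).map (· + 1)

theorem pvPlaceA_found (g y : Int) (a : List (String × List (String × Int))) :
    ∀ (rows : List (List (List (String × List (String × Int))))) (i : Nat),
    pvFindRep g y (rows.map pvRowY) = some i →
    pvPlaceA g y a rows = pvAppendAt i a rows := by
  intro rows
  induction rows with
  | nil => intro i h; simp [pvFindRep] at h
  | cons row rest ih =>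
    intro i h
    simp only [List.map_cons, pvFindRep] at h
    simp only [pvPlaceA]
    split at h <;> rename_i hc
    · simp [hc, Option.some.injEq] at h ⊢
      subst h; rfl
    · rcases Option.map_eq_some_iff.mp h with ⟨j, hj, rfl⟩
      simp [hc, pvAppendAt, ih j hj]

theorem pvPlaceA_none (g y : Int) (a : List (String × List (String × Int))) :
    ∀ (rows : List (List (List (String × List (String × Int))))),
    pvFindRep g y (rows.map pvRowY) = none →
    pvPlaceA g y a rows = rows ++ [[a]] := by
  intro rows
  induction rows with
  | nil => intro _; rfl
  | cons row rest ih =>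
    intro h
    simp only [List.map_cons, pvFindRep] at h
    simp only [pvPlaceA]
    split at h <;> rename_i hc
    · simp at h
    · simp [hc, ih (Option.map_eq_none_iff.mp h)]

theorem pvFindRep_none_iff (g y : Int) :
    ∀ (l : List Int), pvFindRep g y l = none ↔ ∀ v ∈ l, ¬(y - g ≤ v ∧ v ≤ y + g) := by
  intro l
  induction l with
  | nil => simp [pvFindRep]
  | cons r rs ih =>
    simp only [pvFindRep]
    split <;> rename_i hc
    · have hr : y - g ≤ r ∧ r ≤ y + g := by rw [abs_le] at hc; constructor <;> omega
      constructor
      · intro h; simp at h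
      · intro h; exact absurd hr (h r (by simp))
    · rw [Option.map_eq_none_iff, ih]
      constructor
      · intro h v hv
        rcases List.mem_cons.mp hv with rfl | hv
        · intro hbnd; exact hc (by rw [abs_le]; omega)
        · exact h v hv
      · intro h v hv; exact h v (List.mem_cons_of_mem _ hv)

theorem pvFindRep_some (g y : Int) :
    ∀ (l : List Int) (i : Nat), pvFindRep g y l = some i →
    i < l.length ∧ (y - g ≤ l.getD i 0 ∧ l.getD i 0 ≤ y + g) ∧
      ∀ j, j < i → ¬(y - g ≤ l.getD j 0 ∧ l.getD j 0 ≤ y + g) := by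
  intro l
  induction l with
  | nil => intro i h; simp [pvFindRep] at h
  | cons r rs ih =>
    intro i h
    simp only [pvFindRep] at h
    split at h <;> rename_i hc
    · simp at h; subst h
      refine ⟨by simp, ?_, by omega⟩
      rw [abs_le] at hc
      simp only [List.getD_cons_zero]
      omega
    · rcases Option.map_eq_some_iff.mp h with ⟨j, hj, rfl⟩
      obtain ⟨h1, h2, h3⟩ := ih j hj
      refine ⟨by simp; omega, by simpa using h2, ?_⟩
      intro k hk
      match k with
      | 0 =>
        simp only [List.getD_cons_zero]
        intro hbnd
        exact hc (by rw [abs_le]; omega)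
      | k + 1 => simpa using h3 k (by omega)

theorem pvNatMin_cases (p q : Nat) : Nat.min p q = p ∨ Nat.min p q = q := by
  have h : Nat.min p q = min p q := rfl
  rw [h, Nat.min_def]; split <;> simp

theorem pvNatMin_le (p q : Nat) : Nat.min p q ≤ p ∧ Nat.min p q ≤ q := by
  have h : Nat.min p q = min p q := rfl
  rw [h]; exact ⟨min_le_left _ _, min_le_right _ _⟩

theorem pvMin_mem : ∀ (xs : List Nat) (x : Nat), xs.foldl Nat.min x ∈ x :: xs := by
  intro xs
  induction xs with
  | nil => intro x; simp
  | cons a xs ih =>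
    intro x
    have h := ih (Nat.min x a)
    simp only [List.foldl_cons]
    rcases List.mem_cons.mp h with h | h
    · rcases pvNatMin_cases x a with h2 | h2 <;> rw [h, h2] <;> simp
    · simp [h]

theorem pvMin_le : ∀ (xs : List Nat) (x y : Nat), y ∈ x :: xs → xs.foldl Nat.min x ≤ y := by
  intro xs
  induction xs with
  | nil => intro x y hy; simp at hy; simp [hy]
  | cons a xs ih =>
    intro x y hy
    simp only [List.foldl_cons]
    rcases List.mem_cons.mp hy with rfl | hy
    · exact le_trans (ih (Nat.min y a) (Nat.min y a) (by simp)) (pvNatMin_le y a).1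
    · rcases List.mem_cons.mp hy with rfl | hy
      · exact le_trans (ih (Nat.min x y) (Nat.min x y) (by simp)) (pvNatMin_le x y).2
      · exact ih (Nat.min x a) y (by simp [hy])

theorem pvMin_spec (l : List Nat) (h : l ≠ []) : pvMin l ∈ l ∧ ∀ w ∈ l, pvMin l ≤ w := by
  match l with
  | [] => exact absurd rfl h
  | x :: xs => exact ⟨pvMin_mem xs x, fun w hw => pvMin_le xs x w hw⟩

theorem pv_sorted_getD_mono (a : List Int) (ha : a.Pairwise (· ≤ ·)) (i j : Nat)
    (hij : i ≤ j) (hj : j < a.length) : a.getD i 0 ≤ a.getD j 0 := by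
  rcases Nat.lt_or_ge i j with h | h
  · rw [List.getD_eq_getElem a 0 (by omega), List.getD_eq_getElem a 0 hj]
    exact List.pairwise_iff_getElem.mp ha i j (by omega) hj h
  · have : i = j := by omega
    subst this; exact le_refl _

theorem pvBLFuel_spec (a : List Int) (x : Int) (ha : a.Pairwise (· ≤ ·)) :
    ∀ (n lo hi : Nat), hi - lo ≤ n → lo ≤ hi → hi ≤ a.length →
    (∀ i, i < lo → a.getD i 0 < x) → (∀ i, hi ≤ i → i < a.length → x ≤ a.getD i 0) →
    pvBLFuel a x n lo hi ≤ a.length ∧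
      (∀ i, i < pvBLFuel a x n lo hi → a.getD i 0 < x) ∧
      (∀ i, pvBLFuel a x n lo hi ≤ i → i < a.length → x ≤ a.getD i 0) := by
  intro n
  induction n with
  | zero =>
    intro lo hi hn h1 h2 h3 h4
    simp only [pvBLFuel]
    exact ⟨by omega, h3, fun i hi' hil => h4 i (by omega) hil⟩
  | succ n ih =>
    intro lo hi hn h1 h2 h3 h4
    by_cases hlt : lo < hi
    · rw [pvBLFuel, if_pos hlt]
      simp only []
      set mid := (lo + hi) / 2 with hmid
      have hm : lo ≤ mid ∧ mid < hi := by constructor <;> omega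
      by_cases hc : a.getD mid 0 < x
      · rw [if_pos hc]
        refine ih (mid + 1) hi (by omega) (by omega) h2 ?_ h4
        intro i hi'
        rcases Nat.lt_or_ge i lo with h | h
        · exact h3 i h
        · exact lt_of_le_of_lt (pv_sorted_getD_mono a ha i mid (by omega) (by omega)) hc
      · rw [if_neg hc]
        refine ih lo mid (by omega) (by omega) (by omega) h3 ?_
        intro i hi' hil
        exact le_trans (not_lt.mp hc) (pv_sorted_getD_mono a ha mid i hi' hil)
    · rw [pvBLFuel, if_neg hlt]
      exact ⟨by omega, h3, fun i hi' hil => h4 i (by omega) hil⟩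

theorem pvBL_spec (a : List Int) (x : Int) (ha : a.Pairwise (· ≤ ·)) :
    ∀ (n lo hi : Nat), hi - lo ≤ n → lo ≤ hi → hi ≤ a.length →
    (∀ i, i < lo → a.getD i 0 < x) → (∀ i, hi ≤ i → i < a.length → x ≤ a.getD i 0) →
    pvBL a x lo hi ≤ a.length ∧
      (∀ i, i < pvBL a x lo hi → a.getD i 0 < x) ∧
      (∀ i, pvBL a x lo hi ≤ i → i < a.length → x ≤ a.getD i 0) := by
  intro _ lo hi _ h1 h2 h3 h4
  exact pvBLFuel_spec a x ha (hi - lo) lo hi (by omega) h1 h2 h3 h4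

-- membership in the slice idxs[lo:hi]
theorem pv_mem_slice (l : List Nat) (lo hi : Nat) (w : Nat) :
    w ∈ (l.drop lo).take (hi - lo) ↔
      ∃ j, lo ≤ j ∧ j < hi ∧ j < l.length ∧ l.getD j 0 = w := by
  rw [List.mem_iff_getElem]
  constructor
  · rintro ⟨i, h, rfl⟩
    have h1 : i < hi - lo := by
      have := h; simp only [List.length_take, List.length_drop] at this; omega
    have h2 : lo + i < l.length := by
      have := h; simp only [List.length_take, List.length_drop] at this; omega
    refine ⟨lo + i, by omega, by omega, h2, ?_⟩
    rw [List.getD_eq_getElem l 0 h2]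
    rw [List.getElem_take, List.getElem_drop]
  · rintro ⟨j, hj1, hj2, hj3, hj4⟩
    have h : j - lo < ((l.drop lo).take (hi - lo)).length := by
      simp only [List.length_take, List.length_drop]; omega
    refine ⟨j - lo, h, ?_⟩
    rw [List.getElem_take, List.getElem_drop]
    rw [← hj4, List.getD_eq_getElem l 0 (by omega)]
    congr 1; omega

theorem pv_mem_zip (keys : List Int) (idxs : List Nat) (hlen : keys.length = idxs.length)
    (v : Int) (i : Nat) :
    (v, i) ∈ keys.zip idxs ↔ ∃ j, j < keys.length ∧ keys.getD j 0 = v ∧ idxs.getD j 0 = i := by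
  rw [List.mem_iff_getElem]
  constructor
  · rintro ⟨j, h, hj⟩
    have hj' : j < keys.length := by
      have := h; simp only [List.length_zip] at this; omega
    rw [List.getElem_zip] at hj
    refine ⟨j, hj', ?_, ?_⟩
    · rw [List.getD_eq_getElem keys 0 hj']; exact congrArg Prod.fst hj
    · rw [List.getD_eq_getElem idxs 0 (by omega)]; exact congrArg Prod.snd hj
  · rintro ⟨j, hj1, hj2, hj3⟩
    have h : j < (keys.zip idxs).length := by simp only [List.length_zip]; omega
    refine ⟨j, h, ?_⟩
    rw [List.getElem_zip]
    rw [List.getD_eq_getElem keys 0 hj1] at hj2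
    rw [List.getD_eq_getElem idxs 0 (by omega)] at hj3
    rw [hj2, hj3]

-- the loop invariant tying B's sorted index to the representative y's of the rows
def PvInv (keys : List Int) (idxs : List Nat) (reps : List Int) : Prop :=
  keys.length = idxs.length ∧ keys.Pairwise (· ≤ ·) ∧
  (∀ v i, (v, i) ∈ keys.zip idxs ↔ (i < reps.length ∧ reps.getD i 0 = v))

theorem pv_zip_insertIdx :
    ∀ (keys : List Int) (idxs : List Nat) (pos : Nat) (y : Int) (n : Nat),
    keys.length = idxs.length → pos ≤ keys.length →
    (keys.insertIdx pos y).zip (idxs.insertIdx pos n) = (keys.zip idxs).insertIdx pos (y, n) := by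
  intro keys
  induction keys with
  | nil =>
    intro idxs pos y n hlen hpos
    have : idxs = [] := List.length_eq_zero_iff.mp (by simp at hlen; omega)
    subst this
    have : pos = 0 := by simpa using hpos
    subst this; rfl
  | cons k ks ih =>
    intro idxs pos y n hlen hpos
    match idxs with
    | [] => simp at hlen
    | i :: is =>
      match pos with
      | 0 => simp [List.insertIdx_zero]
      | pos + 1 =>
        simp only [List.insertIdx_succ_cons, List.zip_cons_cons]
        rw [ih is pos y n (by simpa using hlen) (by simpa using hpos)]

theorem pv_sorted_insertIdx (y : Int) :
    ∀ (keys : List Int) (pos : Nat), keys.Pairwise (· ≤ ·) → pos ≤ keys.length →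
    (∀ i, i < pos → keys.getD i 0 < y) → (∀ i, pos ≤ i → i < keys.length → y ≤ keys.getD i 0) →
    (keys.insertIdx pos y).Pairwise (· ≤ ·) := by
  intro keys
  induction keys with
  | nil =>
    intro pos _ hpos _ _
    have : pos = 0 := by simpa using hpos
    subst this; simp
  | cons k ks ih =>
    intro pos hsort hpos h1 h2
    match pos with
    | 0 =>
      rw [List.insertIdx_zero, List.pairwise_cons]
      refine ⟨?_, hsort⟩
      intro v hv
      rw [List.mem_iff_getElem] at hv
      obtain ⟨j, hj, rfl⟩ := hv
      have := h2 j (by omega) hj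
      rwa [List.getD_eq_getElem _ 0 hj] at this
    | pos + 1 =>
      rw [List.insertIdx_succ_cons, List.pairwise_cons]
      rw [List.pairwise_cons] at hsort
      constructor
      · intro v hv
        have hperm := List.perm_insertIdx y ks (i := pos) (by simpa using hpos)
        rw [hperm.mem_iff] at hv
        rcases List.mem_cons.mp hv with rfl | hv
        · have := h1 0 (by omega); simp at this; omega
        · exact hsort.1 v hv
      · refine ih pos hsort.2 (by simpa using hpos) ?_ ?_
        · intro i hi
          have := h1 (i + 1) (by omega)
          simpa using this
        · intro i hi hil
          have := h2 (i + 1) (by omega) (by simpa using hil)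
          simpa using this

-- characterisation of the slice window under the invariant and the bisect specs
theorem pv_mem_window (keys : List Int) (idxs : List Nat) (reps : List Int)
    (lo hi : Nat) (y g : Int)
    (hlen : keys.length = idxs.length)
    (hinv : ∀ v i, (v, i) ∈ keys.zip idxs ↔ (i < reps.length ∧ reps.getD i 0 = v))
    (hlo1 : ∀ i, i < lo → keys.getD i 0 < y - g)
    (hlo2 : ∀ i, lo ≤ i → i < keys.length → y - g ≤ keys.getD i 0)
    (hhi1 : ∀ i, i < hi → keys.getD i 0 < y + g + 1)
    (hhi2 : ∀ i, hi ≤ i → i < keys.length → y + g + 1 ≤ keys.getD i 0) :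
    ∀ w, w ∈ (idxs.drop lo).take (hi - lo) ↔
      (w < reps.length ∧ y - g ≤ reps.getD w 0 ∧ reps.getD w 0 ≤ y + g) := by
  intro w
  rw [pv_mem_slice]
  constructor
  · rintro ⟨j, hj1, hj2, hj3, hj4⟩
    have hjk : j < keys.length := by omega
    have hz : (keys.getD j 0, w) ∈ keys.zip idxs := by
      rw [pv_mem_zip keys idxs hlen]
      exact ⟨j, hjk, rfl, hj4⟩
    obtain ⟨hw1, hw2⟩ := (hinv _ _).mp hz
    refine ⟨hw1, ?_, ?_⟩
    · rw [hw2]; exact hlo2 j hj1 hjk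
    · rw [hw2]; have := hhi1 j hj2; omega
  · rintro ⟨hw1, hw2, hw3⟩
    have hz : (reps.getD w 0, w) ∈ keys.zip idxs := (hinv _ _).mpr ⟨hw1, rfl⟩
    rw [pv_mem_zip keys idxs hlen] at hz
    obtain ⟨j, hj1, hj2, hj3⟩ := hz
    have hjlo : lo ≤ j := by
      by_contra h
      have := hlo1 j (by omega)
      omega
    have hjhi : j < hi := by
      by_contra h
      have := hhi2 j (by omega) hj1
      omega
    exact ⟨j, hjlo, hjhi, by omega, hj3⟩

theorem pvAppendAt_map_rowY (a : List (String × List (String × Int))) :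
    ∀ (rows : List (List (List (String × List (String × Int))))) (i : Nat),
    (∀ r ∈ rows, r ≠ []) →
    (pvAppendAt i a rows).map pvRowY = rows.map pvRowY := by
  intro rows
  induction rows with
  | nil => intro i _; cases i <;> rfl
  | cons row rest ih =>
    intro i hne
    match i with
    | 0 =>
      have hrow : row ≠ [] := hne row (by simp)
      cases row with
      | nil => exact absurd rfl hrow
      | cons x xs => simp [pvAppendAt, pvRowY]
    | i + 1 =>
      simp [pvAppendAt, ih i (fun r hr => hne r (by simp [hr]))]

theorem pvAppendAt_ne_nil (a : List (String × List (String × Int))) :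
    ∀ (rows : List (List (List (String × List (String × Int))))) (i : Nat),
    (∀ r ∈ rows, r ≠ []) →
    ∀ r' ∈ pvAppendAt i a rows, r' ≠ [] := by
  intro rows
  induction rows with
  | nil => intro i _ r' hr'; simp [pvAppendAt] at hr'
  | cons row rest ih =>
    intro i hne r' hr'
    match i with
    | 0 =>
      simp [pvAppendAt] at hr'
      rcases hr' with rfl | hr'
      · simp
      · exact hne r' (by simp [hr'])
    | i + 1 =>
      simp [pvAppendAt] at hr'
      rcases hr' with rfl | hr'
      · exact hne r' (by simp)
      · exact ih i (fun r hr => hne r (by simp [hr])) r' hr'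

-- the rep y recorded for a freshly created row equals pvRowY of that row
theorem pvRowY_new (a : List (String × List (String × Int))) (b : List (String × Int))
    (hb : pvGet a "bbox" = some b) : pvRowY [a] = (pvGet b "y").getD 0 := by
  simp [pvRowY, hb]

-- main loop invariant
theorem pvLoop_eq (g : Int) :
    ∀ (atoms : List (List (String × List (String × Int))))
      (rows : List (List (List (String × List (String × Int)))))
      (keys : List Int) (idxs : List Nat),
    PvInv keys idxs (rows.map pvRowY) →
    (∀ r ∈ rows, r ≠ []) →
    atoms.foldl (pvStepA g) rows = (atoms.foldl (pvStepB g) (keys, idxs, rows)).2.2 := by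
  intro atoms
  induction atoms with
  | nil => intro rows keys idxs _ _; rfl
  | cons a rest ih =>
    intro rows keys idxs hinv h4
    obtain ⟨hlen, hsort, hmem⟩ := hinv
    simp only [List.foldl_cons]
    rcases hb : pvGet a "bbox" with _ | b
    · rw [show pvStepA g rows a = rows by simp [pvStepA, hb],
        show pvStepB g (keys, idxs, rows) a = (keys, idxs, rows) by simp [pvStepB, hb]]
      exact ih rows keys idxs ⟨hlen, hsort, hmem⟩ h4
    · set y := (pvGet b "y").getD 0 with hy
      set reps := rows.map pvRowY with hreps
      set lo := pvBL keys (y - g) 0 keys.length with hlo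
      set hi := pvBL keys (y + g + 1) 0 keys.length with hhi
      obtain ⟨hloa, hlob, hloc⟩ := pvBL_spec keys (y - g) hsort keys.length 0 keys.length
        (by omega) (by omega) (by omega) (by omega) (by omega)
      obtain ⟨hhia, hhib, hhic⟩ := pvBL_spec keys (y + g + 1) hsort keys.length 0 keys.length
        (by omega) (by omega) (by omega) (by omega) (by omega)
      have hwin := pv_mem_window keys idxs reps lo hi y g hlen hmem hlob hloc hhib hhic
      by_cases hlh : lo < hi
      · -- window nonempty: B appends to the earliest-created matching row,
        -- which is exactly A's first-fit row
        set W := (idxs.drop lo).take (hi - lo) with hW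
        have hWne : W ≠ [] := by
          have : W.length = hi - lo := by
            rw [hW]; simp only [List.length_take, List.length_drop]; omega
          intro hnil; rw [hnil] at this; simp at this; omega
        obtain ⟨hmin_mem, hmin_le⟩ := pvMin_spec W hWne
        obtain ⟨hm1, hm2, hm3⟩ := (hwin (pvMin W)).mp hmin_mem
        -- pvFindRep finds some index
        have hnn : pvFindRep g y reps ≠ none := by
          intro hno
          have := (pvFindRep_none_iff g y reps).mp hno (reps.getD (pvMin W) 0)
            (by rw [List.getD_eq_getElem reps 0 hm1]; exact List.getElem_mem hm1)
          exact this ⟨hm2, hm3⟩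
        rcases hfr : pvFindRep g y reps with _ | i0
        · exact absurd hfr hnn
        · obtain ⟨hi0a, hi0b, hi0c⟩ := pvFindRep_some g y reps i0 hfr
          have hi0W : i0 ∈ W := (hwin i0).mpr ⟨hi0a, hi0b⟩
          have h1 : i0 ≤ pvMin W := by
            by_contra h
            exact hi0c (pvMin W) (by omega) ⟨hm2, hm3⟩
          have h2 : pvMin W ≤ i0 := hmin_le i0 hi0W
          have heq : pvMin W = i0 := by omega
          rw [show pvStepA g rows a = pvAppendAt i0 a rows by
              simp only [pvStepA, hb]
              exact pvPlaceA_found g y a rows i0 hfr,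
            show pvStepB g (keys, idxs, rows) a = (keys, idxs, pvAppendAt i0 a rows) by
              simp only [pvStepB, hb]
              rw [if_pos hlh, ← hW, heq]]
          refine ih _ keys idxs ⟨hlen, hsort, ?_⟩ (pvAppendAt_ne_nil a rows i0 h4)
          rw [pvAppendAt_map_rowY a rows i0 h4, ← hreps]
          exact hmem
      · -- window empty: no row matches; both create a new row
        have hno : pvFindRep g y reps = none := by
          rw [pvFindRep_none_iff]
          intro v hv hbnd
          rw [List.mem_iff_getElem] at hv
          obtain ⟨w, hw, rfl⟩ := hv
          have : reps[w] = reps.getD w 0 := (List.getD_eq_getElem reps 0 hw).symm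
          rw [this] at hbnd
          have := (hwin w).mpr ⟨hw, hbnd⟩
          have hWlen : ((idxs.drop lo).take (hi - lo)).length = 0 := by
            simp only [List.length_take, List.length_drop]; omega
          rw [List.length_eq_zero_iff.mp hWlen] at this
          simp at this
        set pos := pvBL keys y 0 keys.length with hpos
        obtain ⟨hpa, hpb, hpc⟩ := pvBL_spec keys y hsort keys.length 0 keys.length
          (by omega) (by omega) (by omega) (by omega) (by omega)
        rw [show pvStepA g rows a = rows ++ [[a]] by
            simp only [pvStepA, hb]
            exact pvPlaceA_none g y a rows hno,
          show pvStepB g (keys, idxs, rows) a =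
              (keys.insertIdx pos y, idxs.insertIdx pos rows.length, rows ++ [[a]]) by
            simp only [pvStepB, hb]
            rw [if_neg hlh]]
        have hlen' : (keys.insertIdx pos y).length = (idxs.insertIdx pos rows.length).length := by
          rw [List.length_insertIdx, List.length_insertIdx, if_pos hpa, if_pos (by omega), hlen]
        have hreps' : (rows ++ [[a]]).map pvRowY = reps ++ [y] := by
          rw [List.map_append, ← hreps]
          simp [pvRowY_new a b hb, hy]
        refine ih _ _ _ ⟨hlen', pv_sorted_insertIdx y keys pos hsort hpa hpb hpc, ?_⟩ ?_
        · intro v i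
          rw [hreps',
            pv_zip_insertIdx keys idxs pos y rows.length hlen hpa]
          have hperm := List.perm_insertIdx (y, rows.length) (keys.zip idxs)
            (i := pos) (by rw [List.length_zip]; omega)
          rw [hperm.mem_iff, List.mem_cons]
          have hrlen : rows.length = reps.length := by rw [hreps, List.length_map]
          constructor
          · rintro (h | h)
            · rw [Prod.mk.injEq] at h
              obtain ⟨rfl, rfl⟩ := h
              refine ⟨by simp only [List.length_append, List.length_cons, List.length_nil]; omega, ?_⟩
              rw [hrlen, List.getD_eq_getElem _ 0 (by simp), List.getElem_concat_length]
              rfl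
            · obtain ⟨h1, h2⟩ := (hmem v i).mp h
              refine ⟨by simp; omega, ?_⟩
              rw [List.getD_eq_getElem _ 0 (by simp; omega), List.getElem_append_left h1,
                ← List.getD_eq_getElem reps 0 h1, h2]
          · rintro ⟨h1, h2⟩
            simp only [List.length_append, List.length_cons, List.length_nil] at h1
            rcases Nat.lt_or_ge i reps.length with hir | hir
            · right
              refine (hmem v i).mpr ⟨hir, ?_⟩
              rw [List.getD_eq_getElem _ 0 (by simp; omega), List.getElem_append_left hir,
                ← List.getD_eq_getElem reps 0 hir] at h2
              exact h2
            · left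
              have : i = reps.length := by omega
              subst this
              rw [List.getD_eq_getElem _ 0 (by simp), List.getElem_concat_length] at h2
              · rw [Prod.mk.injEq]
                exact ⟨h2.symm, by omega⟩
              · rfl
        · intro r hr
          rcases List.mem_append.mp hr with hr | hr
          · exact h4 r hr
          · simp at hr; simp [hr]

-- ===== VERDICT (by name: the statement is the Claim_ definition above) =====
theorem group_atoms_by_row_py_spec : Claim_equal_group_atoms_by_row_py := by
  intro atoms row_gap _
  show group_atoms_by_row_py atoms row_gap = group_atoms_by_row_py_alt atoms row_gap
  unfold group_atoms_by_row_py group_atoms_by_row_py_alt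
  exact pvLoop_eq row_gap atoms [] [] [] ⟨rfl, by simp, by simp⟩ (by simp)
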